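-- pv_equiv track=rewrite | github.com/FidelElie/smite-central | apps/esports/stringhelper.py | compound_filter
-- ===== SOURCE A (Python) =====
-- def compound_filter(filters):
--     """ Flatten include and exclude filters
--
--     Parameters
--     ----------
--     filters: dict
--         The dictionary of filters to flatten.
--
--     Returns
--     -------
--     flattened_filters: dict
--         The flattened filters with one include and exclude flag
--     """
--     include_lists = [filters[_filter]["include"] for _filter in filters]
--     exclude_lists = [filters[_filter]["exclude"] for _filter in filters]
--     flatten_list = lambda x: [item for sublist in x for item in sublist]
--
--     includes = flatten_list(include_lists)
--     excludes = flatten_list(exclude_lists)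
--
--     flattened_filters = {
--         "include": includes,
--         "exclude": excludes
--     }
--
--     return flattened_filters
-- ===== SOURCE B (Python) =====
-- def compound_filter(filters):
--     items = list(filters.items())
--
--     def go(i):
--         # recursively flatten the tail first, then prepend this filter's lists
--         if i == len(items):
--             return ([], [])
--         inc_rest, exc_rest = go(i + 1)
--         f = items[i][1]
--         return (f["include"] + inc_rest, f["exclude"] + exc_rest)
--
--     includes, excludes = go(0)
--     return {"include": includes, "exclude": excludes}
-- ===== Notes on version B (the rewrite author's own statement) =====
-- stated objective: alternative
-- what changed: Recursive back-to-front construction: a recursion over the filter items builds both include and exclude lists simultaneously by prepending each filter's lists to the recursively flattened tail, replacing A's two key-lookup comprehensions plus a flatten lambda applied twice.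
import Mathlib
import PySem

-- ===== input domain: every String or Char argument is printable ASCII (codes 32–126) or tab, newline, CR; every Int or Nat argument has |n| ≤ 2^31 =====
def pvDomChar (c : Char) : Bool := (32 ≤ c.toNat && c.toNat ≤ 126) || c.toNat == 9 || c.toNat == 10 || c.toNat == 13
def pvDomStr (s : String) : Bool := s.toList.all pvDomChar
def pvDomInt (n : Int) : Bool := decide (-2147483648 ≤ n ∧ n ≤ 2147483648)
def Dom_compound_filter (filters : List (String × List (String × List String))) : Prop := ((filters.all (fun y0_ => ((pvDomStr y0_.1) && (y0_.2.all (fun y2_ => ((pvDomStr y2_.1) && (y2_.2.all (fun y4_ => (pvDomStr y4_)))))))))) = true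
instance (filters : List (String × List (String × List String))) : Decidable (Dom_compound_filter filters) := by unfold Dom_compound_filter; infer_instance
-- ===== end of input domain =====

-- B replaces A's two key-lookup comprehensions plus a flatten lambda applied twice by a
-- recursion over the items that builds both flattened lists back-to-front; same cost.

-- ===== PORT A =====
-- flatten_list = lambda x: [item for sublist in x for item in sublist]
def flatten_list (x : List (List String)) : List String :=
  x.flatMap (fun sublist => sublist)

def compound_filter (filters : List (String × List (String × List String))) : List (String × List String) :=
  -- filters[_filter] / [...]["include"] are dict lookups: first match in the association
  -- list; the .getD [] default is never reached under Pre_compound_filter (else Python raises KeyError)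
  let include_lists := filters.map (fun p => (List.lookup "include" ((List.lookup p.1 filters).getD [])).getD [])
  let exclude_lists := filters.map (fun p => (List.lookup "exclude" ((List.lookup p.1 filters).getD [])).getD [])
  let includes := flatten_list include_lists
  let excludes := flatten_list exclude_lists
  [("include", includes), ("exclude", excludes)]

-- ===== PORT B =====
-- B's inner recursive go(i) over items[i:], transcribed as structural recursion on the list
def compound_filter_go (items : List (String × List (String × List String))) : List String × List String :=
  match items with
  | [] => ([], [])
  | p :: t =>
    let rest := compound_filter_go t
    ((List.lookup "include" p.2).getD [] ++ rest.1,
     (List.lookup "exclude" p.2).getD [] ++ rest.2)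

def compound_filter_alt (filters : List (String × List (String × List String))) : List (String × List String) :=
  let r := compound_filter_go filters
  [("include", r.1), ("exclude", r.2)]

-- ===== PRECONDITION & SPEC =====
-- Pre_ excludes association lists with duplicate keys (not representable as a Python dict,
-- so the ports' first-match lookups would not model any Python run) and inner dicts missing
-- an "include" or "exclude" key, on which Python A raises KeyError.
def Pre_compound_filter (filters : List (String × List (String × List String))) : Prop :=
  (filters.map Prod.fst).Nodup ∧
  ∀ p ∈ filters, (p.2.map Prod.fst).Nodup ∧
    (List.lookup "include" p.2).isSome ∧ (List.lookup "exclude" p.2).isSome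
instance (filters : List (String × List (String × List String))) : Decidable (Pre_compound_filter filters) := by unfold Pre_compound_filter; infer_instance

def pvWitness_compound_filter : (List (String × List (String × List String))) :=
  [("a", [("include", ["x", "y"]), ("exclude", ["z"])]),
   ("b", [("include", []), ("exclude", ["w"])])]

def Spec_compound_filter (filters : List (String × List (String × List String))) (out : List (String × List String)) : Prop := out = compound_filter_alt filters
instance (filters : List (String × List (String × List String))) (out : List (String × List String)) : Decidable (Spec_compound_filter filters out) := by unfold Spec_compound_filter; infer_instance

-- ===== CLAIM (what is proved, stated in full; the proofs are below) =====
def Claim_equal_compound_filter : Prop := ∀ (filters : List (String × List (String × List String))), Dom_compound_filter filters → Pre_compound_filter filters → Spec_compound_filter filters (compound_filter filters)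

-- ===== LEMMAS AND PROOFS =====

-- first-match lookup of a member's own key, under nodup keys
theorem lookup_self_of_nodup {α : Type} (l : List (String × α)) (p : String × α)
    (hnd : (l.map Prod.fst).Nodup) (hp : p ∈ l) : List.lookup p.1 l = some p.2 := by
  induction l with
  | nil => cases hp
  | cons q t ih =>
    simp only [List.map_cons, List.nodup_cons] at hnd
    cases hp with
    | head => simp [List.lookup]
    | tail _ h =>
      have hne : (p.1 == q.1) = false := by
        rw [beq_eq_false_iff_ne]
        intro he
        exact hnd.1 (he ▸ List.mem_map_of_mem h)
      simp [List.lookup, hne, ih hnd.2 h]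

-- B's recursion characterised as the pair of A-style flattened maps
theorem go_eq_flatMap (filters : List (String × List (String × List String))) :
    compound_filter_go filters
    = (filters.flatMap (fun p => (List.lookup "include" p.2).getD []),
       filters.flatMap (fun p => (List.lookup "exclude" p.2).getD [])) := by
  induction filters with
  | nil => rfl
  | cons q t ih => simp [compound_filter_go, ih]

-- ===== VERDICT (by name: the statement is the Claim_ definition above) =====
theorem compound_filter_spec : Claim_equal_compound_filter := by
  intro filters _ hpre
  unfold Spec_compound_filter compound_filter compound_filter_alt flatten_list
  rw [go_eq_flatMap]
  have h1 : filters.map (fun p => (List.lookup "include" ((List.lookup p.1 filters).getD [])).getD [])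
      = filters.map (fun p => (List.lookup "include" p.2).getD []) := by
    apply List.map_congr_left
    intro p hp
    rw [lookup_self_of_nodup filters p hpre.1 hp]
    rfl
  have h2 : filters.map (fun p => (List.lookup "exclude" ((List.lookup p.1 filters).getD [])).getD [])
      = filters.map (fun p => (List.lookup "exclude" p.2).getD []) := by
    apply List.map_congr_left
    intro p hp
    rw [lookup_self_of_nodup filters p hpre.1 hp]
    rfl
  simp [h1, h2, List.flatMap_def, Function.comp_def]
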